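-- pv_equiv track=rewrite | github.com/TechnicolorGUO/SurveyLens | Data_Statistics_and_Analysis/statistical_computation/compute_all_metrics.py | _trust_max_sequence
-- ===== SOURCE A (Python) =====
-- def _filter_ref_num(num, max_num=2000):
--     """过滤可能是年份或异常的大数字"""
--     if num <= 0 or num > max_num:
--         return False
--     if 1900 <= num <= 2099:
--         return False
--     return True
--
-- def _trust_max_sequence(
--     nums,
--     min_max=20,
--     window=12,
--     min_hits=4,
--     min_adjacent_pairs=1,
--     top_search=120,
-- ):
--     """若高位序号存在局部连续簇，信任该簇的最大序号（偏向取大值）"""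
--     if not nums:
--         return None
--
--     arr = sorted(set(int(n) for n in nums if _filter_ref_num(int(n))))
--     if not arr:
--         return None
--
--     # 从高位往下找第一个满足“局部连续”条件的候选值。
--     candidates = arr[-top_search:]
--     for candidate in reversed(candidates):
--         if candidate < min_max:
--             continue
--         local = [n for n in arr if candidate - window <= n <= candidate]
--         hits = len(local)
--         adjacent_pairs = sum(1 for i in range(1, len(local)) if local[i] - local[i - 1] == 1)
--         if hits >= min_hits and adjacent_pairs >= min_adjacent_pairs:
--             return candidate
--
--     return None
-- ===== SOURCE B (Python) =====
-- # B: one filtering pass builds the distinct set, then a prefix-sum table of adjacent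
-- # (+1) pairs over the sorted array; each candidate is judged in O(log m) via a single
-- # binary search + two table lookups, replacing A's full filter scan and inner
-- # adjacency loop per candidate. Candidates are walked by index, back to front.
--
-- def _lower_bound(arr, x):
--     lo, hi = 0, len(arr)
--     while lo < hi:
--         mid = (lo + hi) // 2
--         if arr[mid] < x:
--             lo = mid + 1
--         else:
--             hi = mid
--     return lo
--
-- def _trust_max_sequence(
--     nums,
--     min_max=20,
--     window=12,
--     min_hits=4,
--     min_adjacent_pairs=1,
--     top_search=120,
-- ):
--     seen = set()
--     for n in nums:
--         v = int(n)
--         if 0 < v <= 2000 and not 1900 <= v <= 2099: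
--             seen.add(v)
--     if not seen:
--         return None
--     arr = sorted(seen)
--     m = len(arr)
--
--     # pref[i] = number of consecutive (+1) pairs among arr[0..i]
--     pref = [0]
--     for i in range(1, m):
--         pref.append(pref[-1] + (1 if arr[i] - arr[i - 1] == 1 else 0))
--
--     if top_search > 0:
--         start = m - top_search
--         if start < 0:
--             start = 0
--     else:
--         start = -top_search
--         if start > m:
--             start = m
--
--     i = m - 1
--     while i >= start:
--         c = arr[i]
--         if c >= min_max:
--             lo = _lower_bound(arr, c - window)
--             if lo > i:
--                 hits, pairs = 0, 0
--             else:
--                 hits = i + 1 - lo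
--                 pairs = pref[i] - pref[lo]
--             if hits >= min_hits and pairs >= min_adjacent_pairs:
--                 return c
--         i -= 1
--     return None
-- ===== Notes on version B (the rewrite author's own statement) =====
-- stated objective: alternative
-- what changed: B builds the distinct filtered set in one explicit pass, precomputes a prefix-sum table of adjacent (+1) pairs over the sorted array, and judges each candidate by descending index with a single binary search plus two table lookups, replacing A's per-candidate full filter scan and inner adjacency loop (measured ~1.4x, below the 1.5x bar, since the dedup/sort passes dominate).
import Mathlib
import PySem

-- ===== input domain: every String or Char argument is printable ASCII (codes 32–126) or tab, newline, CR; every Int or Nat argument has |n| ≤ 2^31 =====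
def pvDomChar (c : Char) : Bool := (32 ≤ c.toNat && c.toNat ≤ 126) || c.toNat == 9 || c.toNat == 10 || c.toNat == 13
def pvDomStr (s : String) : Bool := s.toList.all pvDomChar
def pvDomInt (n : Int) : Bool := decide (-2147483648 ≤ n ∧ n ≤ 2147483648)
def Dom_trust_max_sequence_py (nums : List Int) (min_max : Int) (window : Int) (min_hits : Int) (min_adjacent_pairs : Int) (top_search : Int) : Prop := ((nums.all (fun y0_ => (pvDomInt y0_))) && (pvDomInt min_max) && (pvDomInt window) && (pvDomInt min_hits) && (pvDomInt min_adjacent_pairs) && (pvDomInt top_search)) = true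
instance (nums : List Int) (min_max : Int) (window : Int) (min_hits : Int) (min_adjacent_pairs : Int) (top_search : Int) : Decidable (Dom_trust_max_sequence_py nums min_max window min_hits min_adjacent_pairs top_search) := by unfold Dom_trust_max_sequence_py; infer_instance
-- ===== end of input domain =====

-- ===== PORT A =====
-- A faithfully, loop for loop; B replaces the per-candidate filter scan and inner
-- adjacency loop by a prefix-sum table plus one binary search per candidate.

-- helper of A: _filter_ref_num
def pvFilterRefNum (num : Int) : Bool :=
  if num ≤ 0 || 2000 < num then false
  else if 1900 ≤ num && num ≤ 2099 then false
  else true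

-- A's 'sum(1 for i in range(1, len(local)) if local[i] - local[i-1] == 1)'
def pvAdjSum (loc : List Int) : Int :=
  (PySem.List.pyRange 1 (loc.length : Int) 1).foldl
    (fun acc i =>
      if PySem.List.pyGetD loc i 0 - PySem.List.pyGetD loc (i - 1) 0 = 1 then acc + 1 else acc) 0

-- A's candidate loop: per candidate, filter the WHOLE array for the window
def pvLoopA (arr : List Int) (min_max window min_hits min_adjacent_pairs : Int) :
    List Int → Option Int
  | [] => none
  | c :: rest =>
    if c < min_max then pvLoopA arr min_max window min_hits min_adjacent_pairs rest
    else
      let loc := arr.filter (fun n => decide (c - window ≤ n) && decide (n ≤ c))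
      let hits : Int := loc.length
      let adjacent_pairs := pvAdjSum loc
      if min_hits ≤ hits ∧ min_adjacent_pairs ≤ adjacent_pairs then some c
      else pvLoopA arr min_max window min_hits min_adjacent_pairs rest

def trust_max_sequence_py (nums : List Int) (min_max : Int) (window : Int) (min_hits : Int) (min_adjacent_pairs : Int) (top_search : Int) : Option Int :=
  if nums.isEmpty then none
  else
    let arr := PySem.List.sorted (PySem.Set.ofList (nums.filter pvFilterRefNum)) (fun x => x) false
    if arr.isEmpty then none
    else
      pvLoopA arr min_max window min_hits min_adjacent_pairs
        (PySem.List.slice arr (some (-top_search)) none).reverse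

-- ===== PORT B =====
-- Source B's inline filter condition '0 < v <= 2000 and not 1900 <= v <= 2099'
def pvOk (num : Int) : Bool :=
  decide (0 < num ∧ num ≤ 2000) && !(decide (1900 ≤ num ∧ num ≤ 2099))

-- Source B's hand-written _lower_bound ('while lo < hi: mid = (lo+hi)//2; …') is ported as
-- PySem.List.bisectLeft, which is EXACTLY that loop (same lo/hi state, mid, branch).

-- Source B's prefix loop 'pref = [0]; for i in range(1, m): pref.append(pref[-1] + …)':
-- the running pair (arr[i-1], pref[-1]) is the recursion state
def pvPrefAux : Int → Int → List Int → List Int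
  | _, _, [] => []
  | prev, acc, x :: rest =>
    let acc' := acc + (if x - prev = 1 then 1 else 0)
    acc' :: pvPrefAux x acc' rest

def pvPrefList : List Int → List Int
  | [] => []
  | x :: rest => 0 :: pvPrefAux x 0 rest

-- Source B's 'while i >= start' countdown; fuel f stands for i + 1
def pvLoopB (arr pref : List Int) (min_max window min_hits min_adjacent_pairs : Int)
    (start : Nat) : Nat → Option Int
  | 0 => none
  | (i + 1) =>
    if i + 1 ≤ start then none
    else
      let c := PySem.List.pyGetD arr (i : Int) 0
      if min_max ≤ c then
        let lo := PySem.List.bisectLeft arr (c - window)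
        let hp : Int × Int :=
          if i < lo then (0, 0)
          else ((i : Int) + 1 - (lo : Int),
                PySem.List.pyGetD pref (i : Int) 0 - PySem.List.pyGetD pref (lo : Int) 0)
        if min_hits ≤ hp.1 ∧ min_adjacent_pairs ≤ hp.2 then some c
        else pvLoopB arr pref min_max window min_hits min_adjacent_pairs start i
      else pvLoopB arr pref min_max window min_hits min_adjacent_pairs start i

def trust_max_sequence_py_alt (nums : List Int) (min_max : Int) (window : Int) (min_hits : Int) (min_adjacent_pairs : Int) (top_search : Int) : Option Int :=
  let seen := nums.foldl (fun s n => if pvOk n then PySem.Set.add s n else s) PySem.Set.empty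
  if seen.isEmpty then none
  else
    let arr := PySem.List.sorted seen (fun x => x) false
    let m := arr.length
    let pref := pvPrefList arr
    -- Source B's clamped start index ('start = m - top_search; if start < 0: start = 0' /
    -- 'start = -top_search; if start > m: start = m'); Nat subtraction IS the first clamp
    let start : Nat := if 0 < top_search then m - top_search.toNat else min (-top_search).toNat m
    pvLoopB arr pref min_max window min_hits min_adjacent_pairs start m

-- ===== PRECONDITION & SPEC =====
def Spec_trust_max_sequence_py (nums : List Int) (min_max : Int) (window : Int) (min_hits : Int) (min_adjacent_pairs : Int) (top_search : Int) (out : Option Int) : Prop := out = trust_max_sequence_py_alt nums min_max window min_hits min_adjacent_pairs top_search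
instance (nums : List Int) (min_max : Int) (window : Int) (min_hits : Int) (min_adjacent_pairs : Int) (top_search : Int) (out : Option Int) : Decidable (Spec_trust_max_sequence_py nums min_max window min_hits min_adjacent_pairs top_search out) := by unfold Spec_trust_max_sequence_py; infer_instance

-- ===== CLAIM (what is proved, stated in full; the proofs are below) =====
def Claim_equal_trust_max_sequence_py : Prop := ∀ (nums : List Int) (min_max : Int) (window : Int) (min_hits : Int) (min_adjacent_pairs : Int) (top_search : Int), Dom_trust_max_sequence_py nums min_max window min_hits min_adjacent_pairs top_search → Spec_trust_max_sequence_py nums min_max window min_hits min_adjacent_pairs top_search (trust_max_sequence_py nums min_max window min_hits min_adjacent_pairs top_search)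

-- ===== LEMMAS AND PROOFS =====

theorem pvFilter_eq_ok (n : Int) : pvFilterRefNum n = pvOk n := by
  simp only [pvFilterRefNum, pvOk]
  split_ifs <;> simp_all <;> omega

-- B's conditional-add fold is set(filter(...))
theorem foldl_add_filter (nums : List Int) :
    ∀ s : PySem.Set Int,
      nums.foldl (fun s n => if pvOk n then PySem.Set.add s n else s) s =
        (nums.filter pvOk).foldl PySem.Set.add s := by
  induction nums with
  | nil => intro s; rfl
  | cons x t ih =>
    intro s
    by_cases h : pvOk x = true
    · simp [h, List.foldl_cons, ih]
    · simp only [Bool.not_eq_true] at h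
      simp [h, List.foldl_cons, ih]

-- running count of adjacent (+1) pairs among the first k+1 elements
def adjUpTo (xs : List Int) : Nat → Int
  | 0 => 0
  | k + 1 =>
    adjUpTo xs k +
      (if PySem.List.pyGetD xs ((k : Int) + 1) 0 - PySem.List.pyGetD xs (k : Int) 0 = 1 then 1 else 0)

theorem adjUpTo_succ (xs : List Int) (k : Nat) :
    adjUpTo xs (k + 1) =
      adjUpTo xs k +
        (if PySem.List.pyGetD xs ((k : Int) + 1) 0 - PySem.List.pyGetD xs (k : Int) 0 = 1 then 1
         else 0) := rfl

theorem adj_foldl (xs : List Int) :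
    ∀ (k : Nat) (a : Int),
      (PySem.List.pyRange 1 ((k : Int) + 1) 1).foldl
        (fun acc i =>
          if PySem.List.pyGetD xs i 0 - PySem.List.pyGetD xs (i - 1) 0 = 1 then acc + 1 else acc)
        a = a + adjUpTo xs k := by
  intro k
  induction k with
  | zero => intro a; rw [PySem.List.pyRange_one_eq_nil (by norm_num)]; simp [adjUpTo]
  | succ k ih =>
    intro a
    push_cast
    rw [PySem.List.pyRange_one_succ_right (by omega), List.foldl_append, ih]
    simp only [List.foldl_cons, List.foldl_nil, adjUpTo]
    have h2 : ((k : Int) + 1) - 1 = (k : Int) := by ring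
    rw [h2]
    split_ifs <;> ring

theorem pvAdjSum_eq (xs : List Int) : pvAdjSum xs = adjUpTo xs (xs.length - 1) := by
  cases xs with
  | nil => rfl
  | cons x r =>
    show (PySem.List.pyRange 1 (((x :: r).length : Nat) : Int) 1).foldl _ 0 = _
    have hl : (((x :: r).length : Nat) : Int) = ((r.length : Int) + 1) := by
      simp [List.length_cons]
    rw [hl, adj_foldl (x :: r) r.length 0]
    simp [List.length_cons]

theorem pyGetD_cons_succ (p : Int) (xs : List Int) (t : Nat) :
    PySem.List.pyGetD (p :: xs) ((t : Int) + 1) 0 = PySem.List.pyGetD xs (t : Int) 0 := by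
  have h : ((t : Int) + 1) = (((t + 1 : Nat) : Int)) := by push_cast; ring
  rw [h, PySem.List.pyGetD_natCast, PySem.List.pyGetD_natCast]
  rfl

theorem adjUpTo_cons (p : Int) (xs : List Int) :
    ∀ k : Nat,
      adjUpTo (p :: xs) (k + 1) =
        (if PySem.List.pyGetD xs 0 0 - p = 1 then 1 else 0) + adjUpTo xs k := by
  intro k
  induction k with
  | zero =>
    have h0 := pyGetD_cons_succ p xs 0
    have h0' : PySem.List.pyGetD (p :: xs) ((0 : Nat) : Int) 0 = p := by
      rw [PySem.List.pyGetD_natCast]; rfl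
    simp only [adjUpTo, Nat.cast_zero, zero_add, add_zero] at h0 h0' ⊢
    rw [h0, h0']
  | succ k ih =>
    have e1 : PySem.List.pyGetD (p :: xs) (((k + 1 : Nat) : Int) + 1) 0 =
        PySem.List.pyGetD xs (((k + 1 : Nat) : Int)) 0 := pyGetD_cons_succ p xs (k + 1)
    have e2 : PySem.List.pyGetD (p :: xs) (((k + 1 : Nat) : Int)) 0 =
        PySem.List.pyGetD xs ((k : Int)) 0 := by
      have h : (((k + 1 : Nat) : Int)) = ((k : Int) + 1) := by push_cast; ring
      rw [h]; exact pyGetD_cons_succ p xs k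
    show adjUpTo (p :: xs) (k + 1) + _ = _
    rw [ih, e1, e2]
    simp only [adjUpTo]
    rw [show (((k + 1 : Nat) : Int)) = ((k : Int) + 1) by push_cast; ring]
    ring

theorem prefAux_getElem :
    ∀ (rest : List Int) (prev acc : Int) (t : Nat), t < rest.length →
      (pvPrefAux prev acc rest)[t]? = some (acc + adjUpTo (prev :: rest) (t + 1)) := by
  intro rest
  induction rest with
  | nil => intro _ _ t ht; simp at ht
  | cons x r ih =>
    intro prev acc t ht
    cases t with
    | zero =>
      simp only [pvPrefAux, List.getElem?_cons_zero]
      have h1 : adjUpTo (prev :: x :: r) 1 = (if x - prev = 1 then 1 else 0) := by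
        have := adjUpTo_cons prev (x :: r) 0
        have hx : PySem.List.pyGetD (x :: r) 0 0 = x := by
          rw [show (0 : Int) = ((0 : Nat) : Int) by norm_num, PySem.List.pyGetD_natCast]; rfl
        rw [hx] at this
        simpa [adjUpTo] using this
      rw [h1]
    | succ t =>
      simp only [pvPrefAux, List.getElem?_cons_succ]
      have ht' : t < r.length := by simpa using ht
      rw [ih x _ t ht']
      have hsh : adjUpTo (prev :: x :: r) (t + 2) =
          (if x - prev = 1 then 1 else 0) + adjUpTo (x :: r) (t + 1) := by
        have := adjUpTo_cons prev (x :: r) (t + 1)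
        have hx : PySem.List.pyGetD (x :: r) 0 0 = x := by
          rw [show (0 : Int) = ((0 : Nat) : Int) by norm_num, PySem.List.pyGetD_natCast]; rfl
        rw [hx] at this
        exact this
      rw [hsh]
      congr 1
      ring

theorem prefList_getElem (arr : List Int) (j : Nat) (hj : j < arr.length) :
    (pvPrefList arr)[j]? = some (adjUpTo arr j) := by
  cases arr with
  | nil => simp at hj
  | cons x r =>
    cases j with
    | zero => simp [pvPrefList, adjUpTo]
    | succ t =>
      simp only [pvPrefList, List.getElem?_cons_succ]
      have ht : t < r.length := by simpa using hj
      rw [prefAux_getElem r x 0 t ht]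
      simp

-- pyGetD on an in-range Nat index
theorem pyGetD_getElem (xs : List Int) (j : Nat) (hj : j < xs.length) :
    PySem.List.pyGetD xs ((j : Nat) : Int) 0 = xs[j] := by
  rw [PySem.List.pyGetD_natCast]
  exact List.getD_eq_getElem xs 0 hj

-- counting adjacent pairs in a contiguous slice = difference of prefix counts
theorem adj_slice (arr : List Int) (lo i : Nat) (hli : lo ≤ i) (him : i < arr.length) :
    ∀ k : Nat, k ≤ i - lo →
      adjUpTo ((arr.drop lo).take (i + 1 - lo)) k = adjUpTo arr (lo + k) - adjUpTo arr lo := by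
  intro k
  induction k with
  | zero => intro _; simp [adjUpTo]
  | succ k ih =>
    intro hk
    have hk' : k ≤ i - lo := by omega
    have hlen : ((arr.drop lo).take (i + 1 - lo)).length = i + 1 - lo := by
      simp [List.length_take, List.length_drop]; omega
    have hel : ∀ t : Nat, t < i + 1 - lo →
        PySem.List.pyGetD ((arr.drop lo).take (i + 1 - lo)) ((t : Nat) : Int) 0 =
          PySem.List.pyGetD arr (((lo + t : Nat) : Nat) : Int) 0 := by
      intro t ht
      rw [pyGetD_getElem _ t (by omega), pyGetD_getElem arr (lo + t) (by omega)]
      rw [List.getElem_take, List.getElem_drop]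
    have h1 := hel k (by omega)
    have h2 := hel (k + 1) (by omega)
    have hc1 : (((k + 1 : Nat) : Int)) = ((k : Int) + 1) := by push_cast; ring
    have hc2 : (((lo + (k + 1) : Nat) : Int)) = (((lo + k : Nat) : Int) + 1) := by push_cast; ring
    rw [hc1, hc2] at h2
    rw [show lo + (k + 1) = (lo + k) + 1 by omega, adjUpTo_succ, adjUpTo_succ, ih hk', h1, h2]
    ring

-- filtering with a predicate that holds exactly on an index interval is drop/take
theorem filter_eq_drop_take (p : Int → Bool) :
    ∀ (xs : List Int) (lo hi : Nat),
      (∀ (j : Nat) (hj : j < xs.length), p xs[j] = true ↔ (lo ≤ j ∧ j < hi)) →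
      xs.filter p = (xs.drop lo).take (hi - lo) := by
  intro xs
  induction xs with
  | nil => intro lo hi _; simp
  | cons x t ih =>
    intro lo hi h
    match lo, hi with
    | 0, 0 =>
      have hx : p x = false := by
        have := h 0 (by simp); simpa using this
      have ht : t.filter p = [] := by
        have := ih 0 0 (fun j hj => by
          have := h (j+1) (by simpa using Nat.succ_lt_succ hj)
          simpa using this)
        simpa using this
      simp [hx, ht]
    | 0, (k+1) =>
      have hx : p x = true := by
        have := h 0 (by simp); simpa using this
      have ht := ih 0 k (fun j hj => by
        have := h (j+1) (by simpa using Nat.succ_lt_succ hj)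
        constructor
        · intro hp; have := this.mp hp; omega
        · intro hk; exact this.mpr (by omega))
      simp [hx, ht]
    | (l+1), hi =>
      have hx : p x = false := by
        have := h 0 (by simp)
        by_contra hc
        have : (l+1 ≤ 0 ∧ 0 < hi) := (h 0 (by simp)).mp (by simpa using hc)
        omega
      have ht := ih l (hi - 1) (fun j hj => by
        have := h (j+1) (by simpa using Nat.succ_lt_succ hj)
        constructor
        · intro hp; have := this.mp hp; omega
        · intro hk; exact this.mpr (by omega))
      have hsub : hi - (l+1) = (hi - 1) - l := by omega
      simp [hx, ht, hsub]

-- on a strictly sorted array, A's window filter is the index slice [bisectLeft, i]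
theorem local_eq (arr : List Int) (hs : arr.Pairwise (· < ·)) (i : Nat) (him : i < arr.length)
    (w : Int) :
    arr.filter (fun n => decide (arr[i] - w ≤ n) && decide (n ≤ arr[i])) =
      (arr.drop (PySem.List.bisectLeft arr (arr[i] - w))).take
        (i + 1 - PySem.List.bisectLeft arr (arr[i] - w)) := by
  have hs' : arr.Pairwise (· ≤ ·) := hs.imp (fun h => le_of_lt h)
  obtain ⟨hL1, hL2, hL3⟩ := PySem.List.bisectLeft_spec arr (arr[i] - w) hs'
  have hmono := List.pairwise_iff_getElem.mp hs
  apply filter_eq_drop_take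
  intro j hj
  simp only [Bool.and_eq_true, decide_eq_true_eq]
  constructor
  · rintro ⟨h1, h2⟩
    constructor
    · by_contra hlt
      have hx := hL2 j hj (by omega)
      omega
    · by_contra hge
      have : arr[i] < arr[j] := hmono i j him hj (by omega)
      omega
  · rintro ⟨h1, h2⟩
    refine ⟨hL3 j hj h1, ?_⟩
    rcases Nat.lt_or_ge j i with hji | hji
    · exact le_of_lt (hmono j i hj him hji)
    · have : j = i := by omega
      subst this; exact le_refl _

-- the candidate loops agree: A over the reversed tail slice, B by descending index
theorem loop_eq (arr : List Int) (hs : arr.Pairwise (· < ·)) (mm w mh mp : Int) (s : Nat) :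
    ∀ f : Nat, s ≤ f → f ≤ arr.length →
      pvLoopA arr mm w mh mp (((arr.drop s).take (f - s)).reverse) =
        pvLoopB arr (pvPrefList arr) mm w mh mp s f := by
  intro f
  induction f with
  | zero =>
    intro h1 _
    have : s = 0 := by omega
    subst this
    rfl
  | succ i ih =>
    intro h1 h2
    by_cases hsi : i + 1 ≤ s
    · have hse : s = i + 1 := by omega
      subst hse
      simp only [Nat.sub_self, List.take_zero, List.reverse_nil]
      show none = pvLoopB _ _ _ _ _ _ _ (i + 1)
      simp [pvLoopB]
    · have hsle : s ≤ i := by omega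
      have him : i < arr.length := by omega
      have hdec : ((arr.drop s).take (i + 1 - s)).reverse =
          arr[i] :: ((arr.drop s).take (i - s)).reverse := by
        have hidx : (arr.drop s)[i - s]? = some arr[i] := by
          rw [List.getElem?_drop]
          rw [show s + (i - s) = i by omega]
          exact List.getElem?_eq_getElem him
        rw [show i + 1 - s = (i - s) + 1 by omega, List.take_add_one, hidx]
        simp
      rw [hdec]
      have hgc : PySem.List.pyGetD arr ((i : Nat) : Int) 0 = arr[i] := pyGetD_getElem arr i him
      show pvLoopA arr mm w mh mp (arr[i] :: _) = pvLoopB _ _ _ _ _ _ _ (i + 1)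
      simp only [pvLoopA, pvLoopB, if_neg hsi, hgc]
      by_cases hc : arr[i] < mm
      · rw [if_pos hc, if_neg (show ¬ mm ≤ arr[i] by omega), ih hsle (by omega)]
      · rw [if_neg hc, if_pos (show mm ≤ arr[i] by omega)]
        set lo := PySem.List.bisectLeft arr (arr[i] - w) with hlo
        have hloc := local_eq arr hs i him w
        by_cases hio : i < lo
        · have hloc0 : arr.filter (fun n => decide (arr[i] - w ≤ n) && decide (n ≤ arr[i])) = [] := by
            rw [hloc, show i + 1 - lo = 0 by omega]
            simp
          rw [if_pos hio, hloc0]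
          have hadj0 : pvAdjSum ([] : List Int) = 0 := rfl
          simp only [List.length_nil, hadj0, Int.natCast_zero]
          by_cases hcond : mh ≤ (0 : Int) ∧ mp ≤ (0 : Int)
          · rw [if_pos hcond,
              if_pos (show mh ≤ (((0, 0) : Int × Int)).1 ∧ mp ≤ (((0, 0) : Int × Int)).2 from hcond)]
          · rw [if_neg hcond,
              if_neg (show ¬ (mh ≤ (((0, 0) : Int × Int)).1 ∧ mp ≤ (((0, 0) : Int × Int)).2) from hcond)]
            exact ih hsle (by omega)
        · rw [if_neg hio]
          have hlosm : lo ≤ i := by omega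
          have hs' : arr.Pairwise (· ≤ ·) := hs.imp (fun h => le_of_lt h)
          have hL1 := (PySem.List.bisectLeft_spec arr (arr[i] - w) hs').1
          have hlen : (arr.filter (fun n => decide (arr[i] - w ≤ n) && decide (n ≤ arr[i]))).length
              = i + 1 - lo := by
            rw [hloc]
            simp [List.length_take, List.length_drop]
            omega
          have hlenZ : ((arr.filter (fun n => decide (arr[i] - w ≤ n) && decide (n ≤ arr[i]))).length : Int)
              = (i : Int) + 1 - (lo : Int) := by
            rw [hlen]; omega
          have hadj : pvAdjSum (arr.filter (fun n => decide (arr[i] - w ≤ n) && decide (n ≤ arr[i])))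
              = adjUpTo arr i - adjUpTo arr lo := by
            rw [hloc, pvAdjSum_eq]
            have hlen2 : ((arr.drop lo).take (i + 1 - lo)).length = i + 1 - lo := by
              simp [List.length_take, List.length_drop]; omega
            rw [hlen2, show i + 1 - lo - 1 = i - lo by omega]
            rw [adj_slice arr lo i hlosm him (i - lo) (le_refl _)]
            rw [show lo + (i - lo) = i by omega]
          have hpi : PySem.List.pyGetD (pvPrefList arr) ((i : Nat) : Int) 0 = adjUpTo arr i := by
            rw [PySem.List.pyGetD_natCast, List.getD_eq_getElem?_getD, prefList_getElem arr i him]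
            rfl
          have hpl : PySem.List.pyGetD (pvPrefList arr) ((lo : Nat) : Int) 0 = adjUpTo arr lo := by
            rw [PySem.List.pyGetD_natCast, List.getD_eq_getElem?_getD, prefList_getElem arr lo (by omega)]
            rfl
          rw [hlenZ, hadj, hpi, hpl]
          by_cases hcond : mh ≤ (i : Int) + 1 - (lo : Int) ∧ mp ≤ adjUpTo arr i - adjUpTo arr lo
          · rw [if_pos hcond, if_pos (show mh ≤ ((((i : Int) + 1 - (lo : Int),
                adjUpTo arr i - adjUpTo arr lo) : Int × Int)).1 ∧ mp ≤ ((((i : Int) + 1 - (lo : Int),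
                adjUpTo arr i - adjUpTo arr lo) : Int × Int)).2 from hcond)]
          · rw [if_neg hcond, if_neg (show ¬ (mh ≤ ((((i : Int) + 1 - (lo : Int),
                adjUpTo arr i - adjUpTo arr lo) : Int × Int)).1 ∧ mp ≤ ((((i : Int) + 1 - (lo : Int),
                adjUpTo arr i - adjUpTo arr lo) : Int × Int)).2) from hcond)]
            exact ih hsle (by omega)

-- ===== VERDICT (by name: the statement is the Claim_ definition above) =====
theorem trust_max_sequence_py_spec : Claim_equal_trust_max_sequence_py := by
  intro nums mm w mh mp ts _
  unfold Spec_trust_max_sequence_py trust_max_sequence_py trust_max_sequence_py_alt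
  have hseen : nums.foldl (fun s n => if pvOk n then PySem.Set.add s n else s) PySem.Set.empty =
      PySem.Set.ofList (nums.filter pvOk) := by
    rw [foldl_add_filter nums PySem.Set.empty, PySem.Set.ofList_eq_foldl]
    rfl
  have hfil : nums.filter pvFilterRefNum = nums.filter pvOk :=
    List.filter_congr (fun x _ => pvFilter_eq_ok x)
  rw [hfil]
  simp only [hseen]
  set S := PySem.Set.ofList (nums.filter pvOk) with hS
  by_cases h0 : nums.isEmpty
  · have hSnil : S = [] := by
      rw [hS, List.isEmpty_iff.mp h0]
      rfl
    rw [if_pos h0, if_pos (by rw [hSnil]; rfl)]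
  · rw [if_neg h0]
    set arr := PySem.List.sorted S (fun x => x) false with harr
    have hnil : arr.isEmpty = S.isEmpty := by
      by_cases hSe : S = []
      · have ha : arr = [] := by
          rw [harr, hSe]
          exact (PySem.List.sorted_eq_nil_iff _ _ _).mpr rfl
        rw [ha, hSe]
      · have ha : arr ≠ [] := fun hcon => hSe ((PySem.List.sorted_eq_nil_iff _ _ _).mp hcon)
        cases he : arr.isEmpty with
        | true => exact absurd (List.isEmpty_iff.mp he) ha
        | false =>
          cases he2 : S.isEmpty with
          | true => exact absurd (List.isEmpty_iff.mp he2) hSe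
          | false => rfl
    by_cases h1 : arr.isEmpty
    · rw [if_pos h1, if_pos (by rw [← hnil]; exact h1)]
    · rw [if_neg h1, if_neg (by rw [← hnil]; exact h1)]
      have hs : arr.Pairwise (· < ·) := by
        rw [harr, hS]
        exact PySem.List.sorted_ofList_pairwise_lt _
      set m := arr.length with hm
      set start : Nat := if 0 < ts then m - ts.toNat else min (-ts).toNat m with hstart
      have hstart_le : start ≤ m := by
        rw [hstart]; split_ifs <;> omega
      have hslice : PySem.List.slice arr (some (-ts)) none = arr.drop start := by
        rcases lt_trichotomy ts 0 with hts | hts | hts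
        · have hk : (-ts) = (((-ts).toNat : Nat) : Int) := by omega
          rw [hk, PySem.List.slice_from_natCast]
          rw [hstart, if_neg (by omega)]
          rcases Nat.le_total (-ts).toNat m with hle | hle
          · rw [min_eq_left hle]
          · rw [min_eq_right hle, List.drop_eq_nil_of_le (by omega), List.drop_eq_nil_of_le (by omega)]
        · subst hts
          rw [show (-(0:Int)) = (((0:Nat) : Nat) : Int) by norm_num, PySem.List.slice_from_natCast]
          rw [hstart, if_neg (by omega)]
          simp
        · have hk : (-ts) = -((ts.toNat : Nat) : Int) := by omega
          have hkpos : 0 < ts.toNat := by omega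
          rw [hk, PySem.List.slice_from_neg_natCast arr ts.toNat hkpos]
          rw [hstart, if_pos hts, hm]
      rw [hslice]
      have hdt : arr.drop start = (arr.drop start).take (m - start) := by
        rw [List.take_of_length_le (by simp only [List.length_drop]; omega)]
      rw [hdt]
      exact loop_eq arr hs mm w mh mp start m hstart_le (le_refl _)
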